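-- pv_equiv track=rewrite | github.com/half-orm/half-orm-dev | half_orm_dev/version_parser.py | _is_valid_prerelease_identifier
-- ===== SOURCE A (Python) =====
-- def _is_valid_prerelease_identifier(prerelease: str) -> bool:
--     """
--     Internal method to validate pre-release identifier.
--
--     Valid formats: alpha, alpha1, beta, beta1, rc, rc1, dev, dev1, etc.
--
--     Args:
--         prerelease (str): Pre-release identifier
--
--     Returns:
--         bool: True if valid
--     """
--     if not prerelease:
--         return False
--
--     # Valid prefixes
--     valid_prefixes = ['alpha', 'beta', 'rc', 'dev']
--
--     # Check if it starts with a valid prefix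
--     for prefix in valid_prefixes:
--         if prerelease.startswith(prefix):
--             # Check what follows the prefix
--             suffix = prerelease[len(prefix):]
--
--             # Either nothing (just "alpha") or a number ("alpha1")
--             if suffix == "":
--                 return True
--
--             # Must be a positive integer
--             if suffix.isdigit() and int(suffix) > 0:
--                 return True
--
--             # Invalid suffix
--             return False
--
--     # Doesn't start with valid prefix
--     return False
-- ===== SOURCE B (Python) =====
-- def _is_valid_prerelease_identifier(prerelease: str) -> bool:
--     # Single backward scan: split off the maximal trailing digit run, then one check.
--     i = len(prerelease)
--     while i > 0 and prerelease[i - 1].isdigit():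
--         i -= 1
--     head = prerelease[:i]
--     suffix = prerelease[i:]
--     return head in ('alpha', 'beta', 'rc', 'dev') and (suffix == '' or int(suffix) > 0)
-- ===== Notes on version B (the rewrite author's own statement) =====
-- stated objective: simpler
-- what changed: Replaces A's loop over the four prefixes with startswith and slicing by a single backward scan that splits off the maximal trailing digit run, followed by one membership-and-value check.
import Mathlib
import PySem

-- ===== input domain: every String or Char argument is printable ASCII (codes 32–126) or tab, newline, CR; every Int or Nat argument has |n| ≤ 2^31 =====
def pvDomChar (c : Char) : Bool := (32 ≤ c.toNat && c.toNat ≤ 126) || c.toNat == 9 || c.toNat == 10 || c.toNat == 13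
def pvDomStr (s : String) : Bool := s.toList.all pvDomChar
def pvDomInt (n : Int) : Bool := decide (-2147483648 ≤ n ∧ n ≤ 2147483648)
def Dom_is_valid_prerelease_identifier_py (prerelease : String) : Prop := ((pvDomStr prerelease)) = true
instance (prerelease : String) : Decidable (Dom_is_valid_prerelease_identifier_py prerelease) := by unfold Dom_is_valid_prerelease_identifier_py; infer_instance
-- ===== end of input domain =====

-- B replaces A's prefix loop by a single backward scan splitting off the trailing digit run (objective: simpler).

-- ===== PORT A =====
-- the body of A's for-loop after `prerelease.startswith(prefix)`: check the suffix
def pvA_check (s : List Char) (pfx : List Char) : Bool :=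
  let suffix := PySem.List.slice s (some (pfx.length : Int)) none
  if suffix = [] then true
  else if PySem.Chars.strIsdigit suffix
          && decide (0 < (PySem.Int.ofChars? suffix).getD 0) then true
  else false

-- A's `for prefix in valid_prefixes:` with its early returns
def pvA_loop (s : List Char) : List (List Char) → Bool
  | [] => false
  | p :: ps => if PySem.Chars.startswith s p then pvA_check s p else pvA_loop s ps

def is_valid_prerelease_identifier_py (prerelease : String) : Bool :=
  if prerelease.toList.isEmpty then false
  else pvA_loop prerelease.toList
        ["alpha".toList, "beta".toList, "rc".toList, "dev".toList]

-- ===== PORT B =====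
def is_valid_prerelease_identifier_py_alt (prerelease : String) : Bool :=
  let s := prerelease.toList
  -- the while loop: i counts down from len(s) over trailing digits
  let i := s.length - (s.reverse.takeWhile PySem.Chars.isdigit).length
  let head := s.take i
  let suffix := s.drop i
  (head == "alpha".toList || head == "beta".toList || head == "rc".toList || head == "dev".toList)
    && (suffix.isEmpty || decide (0 < (PySem.Int.ofChars? suffix).getD 0))

-- ===== PRECONDITION & SPEC =====
def Spec_is_valid_prerelease_identifier_py (prerelease : String) (out : Bool) : Prop := out = is_valid_prerelease_identifier_py_alt prerelease
instance (prerelease : String) (out : Bool) : Decidable (Spec_is_valid_prerelease_identifier_py prerelease out) := by unfold Spec_is_valid_prerelease_identifier_py; infer_instance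

-- ===== CLAIM (what is proved, stated in full; the proofs are below) =====
def Claim_equal_is_valid_prerelease_identifier_py : Prop := ∀ (prerelease : String), Dom_is_valid_prerelease_identifier_py prerelease → Spec_is_valid_prerelease_identifier_py prerelease (is_valid_prerelease_identifier_py prerelease)

-- ===== LEMMAS AND PROOFS =====

-- Bool test: head is one of the four valid prefixes (B's tuple membership)
def pvP (h : List Char) : Bool :=
  h == "alpha".toList || h == "beta".toList || h == "rc".toList || h == "dev".toList

-- B's value on the character list s (the let-bindings of the port, written out)
def pvB (s : List Char) : Bool :=
  pvP (s.take (s.length - (s.reverse.takeWhile PySem.Chars.isdigit).length))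
    && ((s.drop (s.length - (s.reverse.takeWhile PySem.Chars.isdigit).length)).isEmpty
        || decide (0 < (PySem.Int.ofChars? (s.drop (s.length - (s.reverse.takeWhile PySem.Chars.isdigit).length))).getD 0))

theorem pvP_false_of_no_prefix (s t : List Char)
    (h1 : ¬ "alpha".toList <+: s) (h2 : ¬ "beta".toList <+: s)
    (h3 : ¬ "rc".toList <+: s) (h4 : ¬ "dev".toList <+: s)
    (ht : t <+: s) : pvP t = false := by
  rw [Bool.eq_false_iff]
  intro hp
  simp only [pvP, Bool.or_eq_true, beq_iff_eq] at hp
  obtain ((h | h) | h) | h := hp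
  · exact h1 (h ▸ ht)
  · exact h2 (h ▸ ht)
  · exact h3 (h ▸ ht)
  · exact h4 (h ▸ ht)

-- When s = pfx ++ r for a matched valid prefix pfx, A's suffix check equals B's value.
theorem pv_case (pfx r : List Char)
    (hpd : pfx.reverse.takeWhile PySem.Chars.isdigit = [])
    (hset : pvP pfx = true)
    (hext : ∀ t, pvP t = true → pfx <+: t → t = pfx) :
    pvA_check (pfx ++ r) pfx = pvB (pfx ++ r) := by
  have htw : (pfx ++ r).reverse.takeWhile PySem.Chars.isdigit
      = r.reverse.takeWhile PySem.Chars.isdigit := by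
    rw [List.reverse_append, List.takeWhile_append]
    split_ifs with h
    · have : r.reverse.takeWhile PySem.Chars.isdigit = r.reverse :=
        (List.takeWhile_prefix _).eq_of_length (by simpa using h)
      rw [hpd, this, List.append_nil]
    · rfl
  have hk : (r.reverse.takeWhile PySem.Chars.isdigit).length ≤ r.length := by
    simpa using (List.takeWhile_prefix (l := r.reverse) PySem.Chars.isdigit).length_le
  set k := (r.reverse.takeWhile PySem.Chars.isdigit).length with hkdef
  have hi : (pfx ++ r).length - ((pfx ++ r).reverse.takeWhile PySem.Chars.isdigit).length
      = pfx.length + (r.length - k) := by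
    rw [htw, ← hkdef]; simp; omega
  have hsuffA : PySem.List.slice (pfx ++ r) (some (pfx.length : Int)) none = r := by
    rw [PySem.List.slice_from_natCast]; simp
  have htake : (pfx ++ r).take (pfx.length + (r.length - k)) = pfx ++ r.take (r.length - k) := by
    rw [List.take_append]; simp
  have hdrop : (pfx ++ r).drop (pfx.length + (r.length - k)) = r.drop (r.length - k) := by
    rw [List.drop_append]; simp
  unfold pvA_check pvB
  simp only [hi, hsuffA, htake, hdrop]
  by_cases hr : r = []
  · subst hr; simp [hset]
  · by_cases hall : r.all PySem.Chars.isdigit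
    · have hkr : k = r.length := by
        have : r.reverse.takeWhile PySem.Chars.isdigit = r.reverse := by
          rw [List.takeWhile_eq_self_iff]; intro x hx
          exact List.all_eq_true.mp hall x (List.mem_reverse.mp hx)
        simp [hkdef, this]
      rw [hkr]
      simp only [Nat.sub_self, List.take_zero, List.append_nil, List.drop_zero]
      simp [PySem.Chars.strIsdigit, hr, hall, hset, List.isEmpty_iff]
    · have hklt : k < r.length := by
        rcases Nat.lt_or_ge k r.length with h | h
        · exact h
        · exfalso
          have hke : k = r.reverse.length := by simp; omega
          have : r.reverse.takeWhile PySem.Chars.isdigit = r.reverse :=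
            (List.takeWhile_prefix _).eq_of_length hke
          rw [List.takeWhile_eq_self_iff] at this
          exact hall (List.all_eq_true.mpr fun x hx => this x (List.mem_reverse.mpr hx))
      have hall' : r.all PySem.Chars.isdigit = false := eq_false_of_ne_true hall
      have hA : PySem.Chars.strIsdigit r = false := by
        simp [PySem.Chars.strIsdigit, hall']
      have hhead : pvP (pfx ++ r.take (r.length - k)) = false := by
        rw [Bool.eq_false_iff]; intro hp
        have := hext _ hp (List.prefix_append _ _)
        have hlen := congrArg List.length this
        simp at hlen
        omega
      simp [hA, hr, hhead]

theorem pv_hext (pfx : List Char)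
    (h : ∀ t, pvP t = true → pfx.isPrefixOf t = true → t = pfx) :
    ∀ t, pvP t = true → pfx <+: t → t = pfx := by
  intro t ht hp
  exact h t ht (List.isPrefixOf_iff_prefix.mpr hp)

-- pvP is decidably checkable only on the four constants; enumerate them
theorem pv_hext4 (pfx : List Char) (hset : pvP pfx = true) :
    ∀ t, pvP t = true → pfx <+: t → t = pfx := by
  apply pv_hext
  intro t ht
  simp only [pvP, Bool.or_eq_true, beq_iff_eq] at ht hset
  obtain ((h | h) | h) | h := ht <;> subst h <;>
    obtain ((g | g) | g) | g := hset <;> subst g <;> decide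

-- The list-level equivalence both ports reduce to.
theorem pv_main (s : List Char) :
    (if s.isEmpty then false
     else pvA_loop s ["alpha".toList, "beta".toList, "rc".toList, "dev".toList])
    = (let i := s.length - (s.reverse.takeWhile PySem.Chars.isdigit).length
       (s.take i == "alpha".toList || s.take i == "beta".toList || s.take i == "rc".toList || s.take i == "dev".toList)
        && ((s.drop i).isEmpty || decide (0 < (PySem.Int.ofChars? (s.drop i)).getD 0))) := by
  show _ = pvB s
  by_cases h1 : "alpha".toList <+: s
  · obtain ⟨r, rfl⟩ := h1
    rw [if_neg (by simp)]
    simp only [pvA_loop]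
    rw [if_pos ((PySem.Chars.startswith_iff _ _).mpr (List.prefix_append _ _))]
    exact pv_case _ r (by decide) (by decide) (pv_hext4 _ (by decide))
  · by_cases h2 : "beta".toList <+: s
    · obtain ⟨r, rfl⟩ := h2
      rw [if_neg (by simp)]
      simp only [pvA_loop]
      rw [if_neg (by simp only [PySem.Chars.startswith_iff _ _]; exact h1)]
      rw [if_pos ((PySem.Chars.startswith_iff _ _).mpr (List.prefix_append _ _))]
      exact pv_case _ r (by decide) (by decide) (pv_hext4 _ (by decide))
    · by_cases h3 : "rc".toList <+: s
      · obtain ⟨r, rfl⟩ := h3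
        rw [if_neg (by simp)]
        simp only [pvA_loop]
        rw [if_neg (by simp only [PySem.Chars.startswith_iff _ _]; exact h1)]
        rw [if_neg (by simp only [PySem.Chars.startswith_iff _ _]; exact h2)]
        rw [if_pos ((PySem.Chars.startswith_iff _ _).mpr (List.prefix_append _ _))]
        exact pv_case _ r (by decide) (by decide) (pv_hext4 _ (by decide))
      · by_cases h4 : "dev".toList <+: s
        · obtain ⟨r, rfl⟩ := h4
          rw [if_neg (by simp)]
          simp only [pvA_loop]
          rw [if_neg (by simp only [PySem.Chars.startswith_iff _ _]; exact h1)]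
          rw [if_neg (by simp only [PySem.Chars.startswith_iff _ _]; exact h2)]
          rw [if_neg (by simp only [PySem.Chars.startswith_iff _ _]; exact h3)]
          rw [if_pos ((PySem.Chars.startswith_iff _ _).mpr (List.prefix_append _ _))]
          exact pv_case _ r (by decide) (by decide) (pv_hext4 _ (by decide))
        · have hB : pvB s = false := by
            unfold pvB
            rw [pvP_false_of_no_prefix s _ h1 h2 h3 h4 (List.take_prefix _ s)]
            simp
          rw [hB]
          by_cases hs : s.isEmpty
          · simp [hs]
          · rw [if_neg hs]
            simp only [pvA_loop]
            rw [if_neg (by simp only [PySem.Chars.startswith_iff _ _]; exact h1)]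
            rw [if_neg (by simp only [PySem.Chars.startswith_iff _ _]; exact h2)]
            rw [if_neg (by simp only [PySem.Chars.startswith_iff _ _]; exact h3)]
            rw [if_neg (by simp only [PySem.Chars.startswith_iff _ _]; exact h4)]

-- ===== VERDICT (by name: the statement is the Claim_ definition above) =====
theorem is_valid_prerelease_identifier_py_spec : Claim_equal_is_valid_prerelease_identifier_py := by
  intro p _
  unfold Spec_is_valid_prerelease_identifier_py is_valid_prerelease_identifier_py is_valid_prerelease_identifier_py_alt
  exact pv_main p.toList
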